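-- pv_equiv track=rewrite | github.com/ghghang2/v1.6 | nbchat/ui/context_manager.py | _group_by_user_turn
-- ===== SOURCE A (Python) =====
-- from typing import Dict, List, Optional, Tuple
--
-- _Row = Tuple[str, str, str, str, str, int]
--
-- def _group_by_user_turn(rows: List[_Row]) -> List[List[_Row]]:
--     """Split *rows* into per-user-turn groups."""
--     units: List[List[_Row]] = []
--     current: List[_Row] = []
--     for row in rows:
--         if row[0] == "user" and current:
--             units.append(current)
--             current = [row]
--         else:
--             current.append(row)
--     if current:
--         units.append(current)
--     return units
-- ===== SOURCE B (Python) =====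
-- from typing import List, Tuple
--
-- _Row = Tuple[str, str, str, str, str, int]
--
-- def _group_by_user_turn(rows: List[_Row]) -> List[List[_Row]]:
--     """Split *rows* into per-user-turn groups (two-pointer slicing)."""
--     out: List[List[_Row]] = []
--     i, n = 0, len(rows)
--     while i < n:
--         j = i + 1
--         while j < n and rows[j][0] != "user":
--             j += 1
--         out.append(rows[i:j])
--         i = j
--     return out
-- ===== Notes on version B (the rewrite author's own statement) =====
-- stated objective: alternative
-- what changed: A folds rows through a (units, current) accumulator pair; B scans with two pointers, extending j past non-user rows and slicing rows[i:j] out as each group.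
import Mathlib
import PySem

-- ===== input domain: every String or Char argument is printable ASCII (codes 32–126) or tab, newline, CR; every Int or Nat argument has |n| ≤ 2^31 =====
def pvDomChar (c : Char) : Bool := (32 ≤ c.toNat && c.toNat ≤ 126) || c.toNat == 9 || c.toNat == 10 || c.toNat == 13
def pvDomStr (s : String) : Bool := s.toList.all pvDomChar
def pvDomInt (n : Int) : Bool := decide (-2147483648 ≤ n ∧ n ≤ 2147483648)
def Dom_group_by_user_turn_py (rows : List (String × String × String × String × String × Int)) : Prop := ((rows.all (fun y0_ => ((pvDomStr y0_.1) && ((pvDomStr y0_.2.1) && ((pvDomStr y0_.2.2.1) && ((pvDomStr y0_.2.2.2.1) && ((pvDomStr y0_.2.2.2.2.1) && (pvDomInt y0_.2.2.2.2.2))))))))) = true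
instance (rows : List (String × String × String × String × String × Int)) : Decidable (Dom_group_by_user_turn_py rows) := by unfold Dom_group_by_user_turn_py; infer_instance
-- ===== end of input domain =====

-- B replaces A's (units, current) accumulator fold with a two-pointer scan that slices
-- each group out directly; objective: alternative decomposition (same cost).

-- ===== PORT A =====
-- the for-loop over rows carrying (units, current)
def pvAGo (rows : List (String × String × String × String × String × Int))
    (units : List (List (String × String × String × String × String × Int)))
    (current : List (String × String × String × String × String × Int)) :
    List (List (String × String × String × String × String × Int)) :=
  match rows with
  | [] => if current ≠ [] then units ++ [current] else units
  | r :: rest =>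
    if r.1 = "user" ∧ current ≠ [] then pvAGo rest (units ++ [current]) [r]
    else pvAGo rest units (current ++ [r])

def group_by_user_turn_py (rows : List (String × String × String × String × String × Int)) : List (List (String × String × String × String × String × Int)) :=
  pvAGo rows [] []

-- ===== PORT B =====
-- the outer while loop: at position i, the inner while scan `j = i+1; while rows[j][0] != "user"`
-- is the takeWhile over the rows after i, the slice rows[i:j] is the emitted group, and
-- restarting from i = j is the recursive call on the remaining suffix.
def group_by_user_turn_py_alt (rows : List (String × String × String × String × String × Int)) : List (List (String × String × String × String × String × Int)) :=
  match rows with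
  | [] => []
  | r :: rest =>
    (r :: rest.takeWhile (fun x => x.1 != "user")) ::
      group_by_user_turn_py_alt (rest.dropWhile (fun x => x.1 != "user"))
termination_by rows.length
decreasing_by
  have := List.length_dropWhile_le (fun x : String × String × String × String × String × Int => x.1 != "user") rest
  simp; omega

-- ===== PRECONDITION & SPEC =====
def Spec_group_by_user_turn_py (rows : List (String × String × String × String × String × Int)) (out : List (List (String × String × String × String × String × Int))) : Prop := out = group_by_user_turn_py_alt rows
instance (rows : List (String × String × String × String × String × Int)) (out : List (List (String × String × String × String × String × Int))) : Decidable (Spec_group_by_user_turn_py rows out) := by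
  unfold Spec_group_by_user_turn_py
  exact @instDecidableEqList _ (@instDecidableEqList _ inferInstance) out (group_by_user_turn_py_alt rows)

-- ===== CLAIM (what is proved, stated in full; the proofs are below) =====
def Claim_equal_group_by_user_turn_py : Prop := ∀ (rows : List (String × String × String × String × String × Int)), Dom_group_by_user_turn_py rows → Spec_group_by_user_turn_py rows (group_by_user_turn_py rows)

-- ===== LEMMAS AND PROOFS =====

-- loop invariant: once `current` is nonempty, the loop's final result is `units` followed by
-- the group `current` extended by the non-user rows ahead, then B's groups of what remains
theorem pvAGo_nonempty (rows : List (String × String × String × String × String × Int))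
    (units : List (List (String × String × String × String × String × Int)))
    (current : List (String × String × String × String × String × Int))
    (h : current ≠ []) :
    pvAGo rows units current =
      units ++ (current ++ rows.takeWhile (fun x => x.1 != "user")) ::
        group_by_user_turn_py_alt (rows.dropWhile (fun x => x.1 != "user")) := by
  induction rows generalizing units current with
  | nil => simp [pvAGo, h, group_by_user_turn_py_alt]
  | cons r rest ih =>
    by_cases hu : r.1 = "user"
    · have hq : ((fun x : String × String × String × String × String × Int => x.1 != "user") r) = false := by
        simp [hu]
      rw [pvAGo, if_pos ⟨hu, h⟩, ih _ _ (List.cons_ne_nil _ _)]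
      simp only [List.takeWhile_cons, List.dropWhile_cons, hq, Bool.false_eq_true, if_false]
      rw [group_by_user_turn_py_alt]
      simp
    · have hq : ((fun x : String × String × String × String × String × Int => x.1 != "user") r) = true := by
        simp [hu]
      rw [pvAGo, if_neg (by simp [hu]), ih _ _ (by simp [h])]
      simp [hq]

-- ===== VERDICT (by name: the statement is the Claim_ definition above) =====
theorem group_by_user_turn_py_spec : Claim_equal_group_by_user_turn_py := by
  intro rows _
  unfold Spec_group_by_user_turn_py group_by_user_turn_py
  match rows with
  | [] => simp [pvAGo, group_by_user_turn_py_alt]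
  | r :: rest =>
    rw [pvAGo, if_neg (by simp)]
    rw [pvAGo_nonempty _ _ _ (by simp)]
    rw [group_by_user_turn_py_alt]
    simp
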